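-- pv_equiv track=rewrite | github.com/volcengine/verl | atropos/environments/intern_bootcamp/internbootcamp_lib/internbootcamp/bootcamp/cmahmoudandamessage/cmahmoudandamessage.py | solve
-- ===== SOURCE A (Python) =====
-- def solve(n, s_str, a_list):
--     s = [ord(c) - ord('a') for c in s_str]
--     a = a_list
--     MOD = 10**9 +7
--     if n ==0:
--         return (0,0,0)
--     T = [0]*n
--     maxs =0
--     mins=0
--     lasts=0
--     for i in range(n):
--         if i ==0:
--             maxs =1
--             T[i] =1
--             mins =1
--             lasts=0
--         else:
--             mm =i
--             start_j = i
--             end_j = max(i - a[s[i]], -1)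
--             for j in range(start_j, end_j, -1):
--                 if j <0:
--                     break
--                 length = i -j +1
--                 flag =0
--                 for k in range(j, i+1):
--                     if a[s[k]] < length:
--                         flag=1
--                         break
--                 if flag:
--                     break
--                 else:
--                     mm =j
--                     if j ==0:
--                         adding =1
--                     else:
--                         adding = T[j-1]
--                     T[i] = (T[i] + adding) % MOD
--             maxs = max(maxs, i - mm +1)
--             if mm > lasts:
--                 mins +=1
--                 lasts =i
--     ways = T[-1] % MOD if n else 0
--     return (ways, maxs, mins)
-- ===== SOURCE B (Python) =====
-- # B: single O(n^2) pass — running window minimum replaces A's inner O(n) validity rescans.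
-- def solve(n, s_str, a_list):
--     MOD = 10**9 + 7
--     if n == 0:
--         return (0, 0, 0)
--     lim = [a_list[ord(c) - ord('a')] for c in s_str[:n]]
--     T = [0] * n
--     T[0] = 1
--     maxs, mins, lasts = 1, 1, 0
--     for i in range(1, n):
--         m = lim[i]
--         mm = i
--         total = 0
--         j = i
--         while j >= 0:
--             if lim[j] < m:
--                 m = lim[j]
--             if i - j + 1 > m:
--                 break
--             total += T[j - 1] if j > 0 else 1
--             mm = j
--             j -= 1
--         T[i] = total % MOD
--         if i - mm + 1 > maxs:
--             maxs = i - mm + 1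
--         if mm > lasts:
--             mins += 1
--             lasts = i
--     return (T[n - 1] % MOD, maxs, mins)
-- ===== Notes on version B (the rewrite author's own statement) =====
-- stated objective: faster
-- what changed: B precomputes the per-position limits once and replaces A's inner O(n) re-scan of every candidate segment (and A's separate range-bound computation) by a single running window minimum per position, so each dp step is one backward pass; the total is accumulated and reduced mod 10^9+7 once per position instead of per addition.
-- outside the precondition, e.g. on solve(2, 'ba', [0]): A returns (0, 1, 2), B raises IndexError; on solve(1, 'A', []): A returns (1, 1, 1), B raises IndexError
import Mathlib
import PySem

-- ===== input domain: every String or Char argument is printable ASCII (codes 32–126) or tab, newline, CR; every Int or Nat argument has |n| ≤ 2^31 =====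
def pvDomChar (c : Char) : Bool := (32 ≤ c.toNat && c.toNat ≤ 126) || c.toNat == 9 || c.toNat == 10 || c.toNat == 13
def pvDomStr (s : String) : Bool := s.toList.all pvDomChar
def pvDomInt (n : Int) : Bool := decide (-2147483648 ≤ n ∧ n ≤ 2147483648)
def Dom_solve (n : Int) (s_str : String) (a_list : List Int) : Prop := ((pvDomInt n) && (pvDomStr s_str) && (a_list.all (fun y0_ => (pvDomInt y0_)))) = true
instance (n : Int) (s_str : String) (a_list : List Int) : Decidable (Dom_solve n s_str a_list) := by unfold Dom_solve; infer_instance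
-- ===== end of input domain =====

-- B replaces A's O(n) validity re-scan per candidate split point by a running window minimum
-- (one pass per i instead of a nested scan); equivalence of the return values is proved under Pre_solve.

-- ===== PORT A =====
-- inner k-loop: `for k in range(j, i+1): if a[s[k]] < length: flag=1; break`
def aKLoop (a s : List Int) (len : Int) (i : Nat) (k : Nat) : Bool :=
  if k < i + 1 then
    if PySem.List.pyGetD a (PySem.List.pyGetD s (k : Int) 0) 0 < len then true
    else aKLoop a s len i (k + 1)
  else false
termination_by (i + 1) - k

-- j-loop: `for j in range(i, end_j, -1)` with the break/accumulation of A.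
-- Python's `if j < 0: break` is unreachable (end_j ≥ -1 and j starts at i ≥ 0), so after
-- processing j = 0 the range is exhausted (next j = -1 ≤ end_j); `Ti` is A's running T[i].
def aJLoop (a s T : List Int) (i : Nat) (endj : Int) (mm Ti : Int) (j : Nat) : Int × Int :=
  if (j : Int) ≤ endj then (mm, Ti)
  else
    if aKLoop a s ((i : Int) - (j : Int) + 1) i j then (mm, Ti)
    else
      let adding := if j = 0 then (1 : Int) else PySem.List.pyGetD T ((j : Int) - 1) 0
      let Ti' := PySem.Int.mod (Ti + adding) (10 ^ 9 + 7)
      if j = 0 then ((0 : Int), Ti')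
      else aJLoop a s T i endj (j : Int) Ti' (j - 1)
termination_by j
decreasing_by omega

-- outer `for i in range(n)` loop; state (T, maxs, mins, lasts)
def aLoop (a s : List Int) (nn : Nat) (T : List Int) (maxs mins lasts : Int) (i : Nat) :
    List Int × Int × Int × Int :=
  if i < nn then
    if i = 0 then
      aLoop a s nn (PySem.List.pySetD T 0 1) 1 1 0 (i + 1)
    else
      let endj := max ((i : Int) - PySem.List.pyGetD a (PySem.List.pyGetD s (i : Int) 0) 0) (-1)
      let p := aJLoop a s T i endj (i : Int) 0 i
      let T' := PySem.List.pySetD T (i : Int) p.2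
      let maxs' := max maxs ((i : Int) - p.1 + 1)
      if p.1 > lasts then aLoop a s nn T' maxs' (mins + 1) (i : Int) (i + 1)
      else aLoop a s nn T' maxs' mins lasts (i + 1)
  else (T, maxs, mins, lasts)
termination_by nn - i

def solve (n : Int) (s_str : String) (a_list : List Int) : List Int :=
  let s := s_str.toList.map (fun c => (c.toNat : Int) - 97)
  if n = 0 then [0, 0, 0]
  else
    let r := aLoop a_list s n.toNat (List.replicate n.toNat 0) 0 0 0 0
    -- `T[-1]` raises in Python when n < 0 (T = []); such inputs are outside Pre_solve
    let ways := PySem.Int.mod (PySem.List.pyGetD r.1 (-1) 0) (10 ^ 9 + 7)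
    [ways, r.2.1, r.2.2.1]

-- ===== PORT B =====
-- `while j >= 0` with running minimum m; returns (total, mm).  The loop decrements j and
-- Python leaves it at -1 after processing j = 0, so the recursion stops there.
def bInner (lim T : List Int) (i : Nat) (m total mm : Int) (j : Nat) : Int × Int :=
  let lj := PySem.List.pyGetD lim (j : Int) 0
  let m' := if lj < m then lj else m
  if (i : Int) - (j : Int) + 1 > m' then (total, mm)
  else
    let total' := total + (if 0 < j then PySem.List.pyGetD T ((j : Int) - 1) 0 else 1)
    if j = 0 then (total', (0 : Int))
    else bInner lim T i m' total' (j : Int) (j - 1)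
termination_by j
decreasing_by omega

-- `for i in range(1, n)`; state (T, maxs, mins, lasts); returns (T, maxs, mins)
def bLoop (lim : List Int) (nn : Nat) (T : List Int) (maxs mins lasts : Int) (i : Nat) :
    List Int × Int × Int :=
  if i < nn then
    let p := bInner lim T i (PySem.List.pyGetD lim (i : Int) 0) 0 (i : Int) i
    let T' := PySem.List.pySetD T (i : Int) (PySem.Int.mod p.1 (10 ^ 9 + 7))
    let maxs' := if (i : Int) - p.2 + 1 > maxs then (i : Int) - p.2 + 1 else maxs
    if p.2 > lasts then bLoop lim nn T' maxs' (mins + 1) (i : Int) (i + 1)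
    else bLoop lim nn T' maxs' mins lasts (i + 1)
  else (T, maxs, mins)
termination_by nn - i

def solve_alt (n : Int) (s_str : String) (a_list : List Int) : List Int :=
  if n = 0 then [0, 0, 0]
  else
    let lim := (PySem.List.slice s_str.toList none (some n)).map
      (fun c => PySem.List.pyGetD a_list ((c.toNat : Int) - 97) 0)
    let nn := n.toNat
    -- `T[0] = 1` raises in Python when n < 0 (T = []); such inputs are outside Pre_solve
    let T0 := PySem.List.pySetD (List.replicate nn 0) 0 1
    let r := bLoop lim nn T0 1 1 0 1
    [PySem.Int.mod (PySem.List.pyGetD r.1 ((nn : Int) - 1) 0) (10 ^ 9 + 7), r.2.1, r.2.2]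

-- ===== PRECONDITION & SPEC =====
-- Pre_solve excludes inputs where Python raises an IndexError: n < 0 (A's T[-1] on an empty T),
-- n beyond the string length, and characters whose a-index is out of range; A sometimes still
-- returns on the latter two kinds because its inner loops break before reaching the bad access,
-- while B (which reads every limit of the first n characters up front) raises there.
def Pre_solve (n : Int) (s_str : String) (a_list : List Int) : Prop :=
  0 ≤ n ∧ n ≤ (s_str.toList.length : Int) ∧
    ((PySem.List.slice s_str.toList none (some n)).all
      (fun c => decide (PySem.Raise.InRange a_list.length ((c.toNat : Int) - 97)))) = true
instance (n : Int) (s_str : String) (a_list : List Int) : Decidable (Pre_solve n s_str a_list) := by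
  unfold Pre_solve; infer_instance

def pvWitness_solve : Int × String × List Int := (3, "abc", [2, 2, 2])

def Spec_solve (n : Int) (s_str : String) (a_list : List Int) (out : List Int) : Prop :=
  out = solve_alt n s_str a_list
instance (n : Int) (s_str : String) (a_list : List Int) (out : List Int) :
    Decidable (Spec_solve n s_str a_list out) := by unfold Spec_solve; infer_instance

-- ===== CLAIM (what is proved, stated in full; the proofs are below) =====
def Claim_equal_solve : Prop := ∀ (n : Int) (s_str : String) (a_list : List Int),
  Dom_solve n s_str a_list → Pre_solve n s_str a_list →
    Spec_solve n s_str a_list (solve n s_str a_list)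

-- ===== LEMMAS AND PROOFS =====

-- the limit of position k, as A reads it: a[s[k]]
def limA (a s : List Int) (k : Nat) : Int :=
  PySem.List.pyGetD a (PySem.List.pyGetD s (k : Int) 0) 0

-- minimum of the limits over the window [j, i]
def minW (a s : List Int) (i j : Nat) : Int :=
  if j < i then min (limA a s j) (minW a s i (j + 1)) else limA a s i
termination_by i - j

lemma minIf (a b : Int) : (if b < a then b else a) = min a b := by
  rw [min_def]; split <;> split <;> omega

lemma maxIf (a b : Int) : (if b > a then b else a) = max a b := by
  rw [max_def]; split <;> split <;> omega

lemma mod_mod_add (x y : Int) :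
    PySem.Int.mod (PySem.Int.mod x (10 ^ 9 + 7) + y) (10 ^ 9 + 7)
      = PySem.Int.mod (x + y) (10 ^ 9 + 7) := by
  rw [PySem.Int.mod_eq_emod_of_pos (by norm_num), PySem.Int.mod_eq_emod_of_pos (by norm_num),
    PySem.Int.mod_eq_emod_of_pos (by norm_num), Int.emod_add_emod]

lemma minW_step (a s : List Int) (i jj : Nat) (h : jj + 1 ≤ i) :
    min (minW a s i (jj + 1)) (limA a s jj) = minW a s i jj := by
  rw [min_comm]
  conv_rhs => rw [minW]
  rw [if_pos (by omega : jj < i)]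

lemma minW_le_last (a s : List Int) (i j : Nat) (h : j ≤ i) :
    minW a s i j ≤ limA a s i := by
  obtain ⟨d, hd⟩ : ∃ d, j + d = i := ⟨i - j, by omega⟩
  induction d generalizing j with
  | zero => rw [minW]; simp [show j = i by omega]
  | succ d ih =>
    rw [minW, if_pos (by omega)]
    exact le_trans (min_le_right _ _) (ih (j + 1) (by omega) (by omega))

lemma aKLoop_eq (a s : List Int) (i : Nat) :
    ∀ j ≤ i, ∀ len : Int, aKLoop a s len i j = decide (minW a s i j < len) := by
  intro j hj len
  obtain ⟨d, hd⟩ : ∃ d, j + d = i := ⟨i - j, by omega⟩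
  induction d generalizing j with
  | zero =>
    have hji : j = i := by omega
    subst hji
    rw [aKLoop, aKLoop, minW]
    simp only [show j < j + 1 by omega, if_pos, show ¬ (j + 1) < j + 1 by omega,
      if_false, show ¬ j < j by omega, limA]
    split <;> simp_all
  | succ d ih =>
    rw [aKLoop, if_pos (show j < i + 1 by omega), minW, if_pos (show j < i by omega)]
    by_cases hf : PySem.List.pyGetD a (PySem.List.pyGetD s (j : Int) 0) 0 < len
    · have hl : limA a s j < len := hf
      rw [if_pos hf]
      have hm : min (limA a s j) (minW a s i (j + 1)) < len :=
        lt_of_le_of_lt (min_le_left _ _) hl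
      simp [hm]
    · have hl : ¬ limA a s j < len := hf
      rw [if_neg hf, ih (j + 1) (by omega) (by omega)]
      simp only [decide_eq_decide, min_lt_iff]
      tauto

lemma inner_eq (a s T lim : List Int) (i : Nat)
    (hlim : ∀ k ≤ i, PySem.List.pyGetD lim (k : Int) 0 = limA a s k) :
    ∀ j, j ≤ i → ∀ m total mm : Int, min m (limA a s j) = minW a s i j →
      aJLoop a s T i (max ((i : Int) - limA a s i) (-1)) mm
          (PySem.Int.mod total (10 ^ 9 + 7)) j
        = ((bInner lim T i m total mm j).2,
           PySem.Int.mod (bInner lim T i m total mm j).1 (10 ^ 9 + 7)) := by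
  intro j
  induction j with
  | zero =>
    intro hj m total mm hm
    rw [aJLoop, bInner]
    simp only [hlim 0 hj, minIf, hm, gt_iff_lt]
    by_cases hS : minW a s i 0 < (i : Int) - ((0 : Nat) : Int) + 1
    · rw [if_pos hS]
      by_cases hed : ((0 : Nat) : Int) ≤ max ((i : Int) - limA a s i) (-1)
      · rw [if_pos hed]
      · rw [if_neg hed, aKLoop_eq a s i 0 hj, if_pos (by simpa using hS)]
    · have hed : ¬ ((0 : Nat) : Int) ≤ max ((i : Int) - limA a s i) (-1) := by
        have h1 := minW_le_last a s i 0 hj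
        omega
      rw [if_neg hed, aKLoop_eq a s i 0 hj, if_neg (by simpa using hS),
        if_neg hS]
      simp only [if_neg (by omega : ¬ (0 : Nat) < 0)]
      rw [mod_mod_add]
      simp
  | succ jj ih =>
    intro hj m total mm hm
    rw [aJLoop, bInner]
    simp only [hlim (jj + 1) hj, minIf, hm, gt_iff_lt]
    by_cases hS : minW a s i (jj + 1) < (i : Int) - ((jj + 1 : Nat) : Int) + 1
    · rw [if_pos hS]
      by_cases hed : ((jj + 1 : Nat) : Int) ≤ max ((i : Int) - limA a s i) (-1)
      · rw [if_pos hed]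
      · rw [if_neg hed, aKLoop_eq a s i (jj + 1) hj, if_pos (by simpa using hS)]
    · have hed : ¬ ((jj + 1 : Nat) : Int) ≤ max ((i : Int) - limA a s i) (-1) := by
        have h1 := minW_le_last a s i (jj + 1) hj
        omega
      rw [if_neg hed, aKLoop_eq a s i (jj + 1) hj, if_neg (by simpa using hS), if_neg hS]
      simp only [if_neg (by omega : ¬ jj + 1 = 0), if_pos (by omega : 0 < jj + 1),
        Nat.add_sub_cancel]
      rw [mod_mod_add]
      exact ih (by omega) _ _ _ (minW_step a s i jj hj)

lemma bLoop_length (lim : List Int) (nn : Nat) :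
    ∀ i T maxs mins lasts, (bLoop lim nn T maxs mins lasts i).1.length = T.length := by
  suffices H : ∀ d i T maxs mins lasts, nn - i ≤ d →
      (bLoop lim nn T maxs mins lasts i).1.length = T.length from
    fun i T maxs mins lasts => H (nn - i) i T maxs mins lasts le_rfl
  intro d
  induction d with
  | zero =>
    intro i T maxs mins lasts h
    rw [bLoop, if_neg (by omega)]
  | succ d ih =>
    intro i T maxs mins lasts h
    by_cases hi : i < nn
    · rw [bLoop, if_pos hi]
      dsimp only
      split
      · rw [ih _ _ _ _ _ (by omega)]
        simp
      · rw [ih _ _ _ _ _ (by omega)]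
        simp
    · rw [bLoop, if_neg hi]

lemma outer_eq (a s lim : List Int) (nn : Nat)
    (hlim : ∀ k < nn, PySem.List.pyGetD lim (k : Int) 0 = limA a s k) :
    ∀ i, 1 ≤ i → ∀ T maxs mins lasts,
      ((aLoop a s nn T maxs mins lasts i).1,
       (aLoop a s nn T maxs mins lasts i).2.1,
       (aLoop a s nn T maxs mins lasts i).2.2.1)
        = bLoop lim nn T maxs mins lasts i := by
  suffices H : ∀ d i, 1 ≤ i → nn - i ≤ d → ∀ T maxs mins lasts,
      ((aLoop a s nn T maxs mins lasts i).1,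
       (aLoop a s nn T maxs mins lasts i).2.1,
       (aLoop a s nn T maxs mins lasts i).2.2.1)
        = bLoop lim nn T maxs mins lasts i from
    fun i h1 T maxs mins lasts => H (nn - i) i h1 le_rfl T maxs mins lasts
  intro d
  induction d with
  | zero =>
    intro i h1 h T maxs mins lasts
    rw [aLoop, bLoop, if_neg (by omega), if_neg (by omega)]
  | succ d ih =>
    intro i h1 h T maxs mins lasts
    by_cases hi : i < nn
    · rw [aLoop, bLoop, if_pos hi, if_pos hi, if_neg (by omega : ¬ i = 0)]
      dsimp only
      rw [hlim i hi]
      have h0 : PySem.Int.mod 0 (10 ^ 9 + 7) = 0 := by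
        rw [PySem.Int.mod_eq_emod_of_pos (by norm_num)]; rfl
      have hin := inner_eq a s T lim i (fun k hk => hlim k (by omega)) i le_rfl
        (limA a s i) 0 (i : Int)
        (by rw [minW, if_neg (by omega : ¬ i < i), min_self])
      rw [h0] at hin
      rw [show PySem.List.pyGetD a (PySem.List.pyGetD s (i : Int) 0) 0 = limA a s i from rfl,
        hin]
      dsimp only
      rw [maxIf]
      by_cases hc : (bInner lim T i (limA a s i) 0 (i : Int) i).2 > lasts
      · rw [if_pos hc, if_pos hc]
        exact ih (i + 1) (by omega) (by omega) _ _ _ _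
      · rw [if_neg hc, if_neg hc]
        exact ih (i + 1) (by omega) (by omega) _ _ _ _
    · rw [aLoop, bLoop, if_neg hi, if_neg hi]

-- ===== VERDICT (by name: the statement is the Claim_ definition above) =====
lemma lim_spec (a_list : List Int) (l : List Char) (n : Int) (hn0 : 0 ≤ n)
    (hnlen : n ≤ (l.length : Int)) :
    ∀ k < n.toNat,
      PySem.List.pyGetD
          ((PySem.List.slice l none (some n)).map
            (fun c => PySem.List.pyGetD a_list ((c.toNat : Int) - 97) 0)) (k : Int) 0
        = limA a_list (l.map (fun c => (c.toNat : Int) - 97)) k := by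
  intro k hk
  have hkl : k < l.length := by omega
  have hslice : PySem.List.slice l none (some n) = l.take n.toNat := by
    rw [show n = ((n.toNat : Nat) : Int) by omega]
    exact PySem.List.slice_to_natCast l n.toNat
  rw [hslice, PySem.List.pyGetD_natCast,
    List.getD_eq_getElem _ _ (by simp [List.length_take]; omega)]
  unfold limA
  rw [PySem.List.pyGetD_natCast, List.getD_eq_getElem _ _ (by simpa using hkl)]
  simp [List.getElem_take]

theorem solve_spec : Claim_equal_solve := by
  unfold Claim_equal_solve
  intro n s_str a_list hdom hpre
  obtain ⟨hn0, hnlen, -⟩ := hpre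
  unfold Spec_solve
  by_cases hz : n = 0
  · unfold solve solve_alt
    rw [if_pos hz, if_pos hz]
  · have hnn : 1 ≤ n.toNat := by omega
    have hlim := lim_spec a_list s_str.toList n hn0 hnlen
    have houter := outer_eq _ _ _ _ hlim 1 le_rfl
      (PySem.List.pySetD (List.replicate n.toNat 0) 0 1) 1 1 0
    have h1 : (aLoop a_list (s_str.toList.map (fun c => (c.toNat : Int) - 97)) n.toNat
        (PySem.List.pySetD (List.replicate n.toNat 0) 0 1) 1 1 0 1).1
          = (bLoop ((PySem.List.slice s_str.toList none (some n)).map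
              (fun c => PySem.List.pyGetD a_list ((c.toNat : Int) - 97) 0)) n.toNat
              (PySem.List.pySetD (List.replicate n.toNat 0) 0 1) 1 1 0 1).1 :=
      congrArg Prod.fst houter
    have hTlen : (aLoop a_list (s_str.toList.map (fun c => (c.toNat : Int) - 97)) n.toNat
        (PySem.List.pySetD (List.replicate n.toNat 0) 0 1) 1 1 0 1).1.length = n.toNat := by
      rw [h1, bLoop_length]
      simp [PySem.List.length_pySetD]
    unfold solve solve_alt
    rw [if_neg hz, if_neg hz]
    dsimp only
    rw [aLoop, if_pos (show 0 < n.toNat by omega), if_pos rfl]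
    simp only [Nat.zero_add]
    rw [← houter]
    dsimp only
    congr 2
    rw [PySem.List.pyGetD_neg_ofNat _ 1 0 (by omega) (by omega),
      show ((n.toNat : Nat) : Int) - 1 = ((n.toNat - 1 : Nat) : Int) by omega,
      PySem.List.pyGetD_natCast, List.getD_eq_getElem _ _ (by omega)]
    simp only [hTlen]
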